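-- pv_equiv track=rewrite | github.com/gurusanand/NewGenZ | components/agent_implementations.py | _create_parallel_groups
-- ===== SOURCE A (Python) =====
-- from typing import Dict, List, Any, Optional
--
-- def _create_parallel_groups(agent_sequence: List[str]) -> List[List[str]]:
--     """Create groups of agents that can execute in parallel"""
--     if len(agent_sequence) <= 2:
--         return [agent_sequence]
--
--     # Group compatible agents
--     parallel_groups = []
--     current_group = []
--
--     for agent in agent_sequence:
--         if len(current_group) < 2:
--             current_group.append(agent)
--         else:
--             parallel_groups.append(current_group)
--             current_group = [agent]
--
--     if current_group:
--         parallel_groups.append(current_group)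
--
--     return parallel_groups
-- ===== SOURCE B (Python) =====
-- from typing import Dict, List, Any, Optional
--
-- def _create_parallel_groups(agent_sequence: List[str]) -> List[List[str]]:
--     """Create groups of agents that can execute in parallel"""
--     groups = [agent_sequence[i:i + 2] for i in range(0, len(agent_sequence), 2)]
--     return groups or [agent_sequence]
-- ===== Notes on version B (the rewrite author's own statement) =====
-- stated objective: idiomatic
-- what changed: Replaced the stateful accumulator loop (append to current_group, flush at size 2, final flush) and its len<=2 early return with a boundary-computing slice comprehension over range(0, len, 2), falling back to [agent_sequence] only when the list is empty.
import Mathlib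
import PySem

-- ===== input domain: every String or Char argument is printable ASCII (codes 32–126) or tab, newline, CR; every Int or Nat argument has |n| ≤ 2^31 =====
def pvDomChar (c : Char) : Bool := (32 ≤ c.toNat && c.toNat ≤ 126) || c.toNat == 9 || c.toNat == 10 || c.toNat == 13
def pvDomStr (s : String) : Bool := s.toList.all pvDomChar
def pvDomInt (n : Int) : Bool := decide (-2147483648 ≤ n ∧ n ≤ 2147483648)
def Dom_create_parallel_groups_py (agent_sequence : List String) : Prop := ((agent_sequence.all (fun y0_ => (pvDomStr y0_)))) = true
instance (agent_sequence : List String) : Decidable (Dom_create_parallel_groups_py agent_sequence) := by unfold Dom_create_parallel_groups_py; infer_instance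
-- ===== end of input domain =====

-- B computes the chunk boundaries directly (slices at range(0, len, 2)) instead of A's accumulator loop with a flush branch; same values everywhere (objective: idiomatic).

-- ===== PORT A =====
-- loop body: if len(current_group) < 2: current_group.append(agent) else: flush and start new group
def createParallelGroupsStepA (st : List (List String) × List String) (agent : String) :
    List (List String) × List String :=
  if st.2.length < 2 then (st.1, st.2 ++ [agent]) else (st.1 ++ [st.2], [agent])

def create_parallel_groups_py (agent_sequence : List String) : List (List String) :=
  if agent_sequence.length ≤ 2 then [agent_sequence]
  else
    let st := agent_sequence.foldl createParallelGroupsStepA ([], [])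
    if st.2 ≠ [] then st.1 ++ [st.2] else st.1

-- ===== PORT B =====
-- groups = [agent_sequence[i:i+2] for i in range(0, len(agent_sequence), 2)]; return groups or [agent_sequence]
def create_parallel_groups_py_alt (agent_sequence : List String) : List (List String) :=
  let groups := (PySem.List.pyRange 0 (agent_sequence.length : Int) 2).map
    (fun i => PySem.List.slice agent_sequence (some i) (some (i + 2)))
  if groups = [] then [agent_sequence] else groups

-- ===== PRECONDITION & SPEC =====
def Spec_create_parallel_groups_py (agent_sequence : List String) (out : List (List String)) : Prop := out = create_parallel_groups_py_alt agent_sequence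
instance (agent_sequence : List String) (out : List (List String)) : Decidable (Spec_create_parallel_groups_py agent_sequence out) := by unfold Spec_create_parallel_groups_py; infer_instance

-- ===== CLAIM (what is proved, stated in full; the proofs are below) =====
def Claim_equal_create_parallel_groups_py : Prop := ∀ (agent_sequence : List String), Dom_create_parallel_groups_py agent_sequence → Spec_create_parallel_groups_py agent_sequence (create_parallel_groups_py agent_sequence)

-- ===== LEMMAS AND PROOFS =====

-- reference chunking: successive pairs, trailing singleton
def pvChunk2 : List String → List (List String)
  | [] => []
  | [a] => [[a]]
  | a :: b :: t => [a, b] :: pvChunk2 t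

def pvFlushA (st : List (List String) × List String) : List (List String) :=
  if st.2 ≠ [] then st.1 ++ [st.2] else st.1

theorem pvLoopA (t : List String) (gs : List (List String)) (c : List String)
    (hc : c.length = 2) :
    pvFlushA (t.foldl createParallelGroupsStepA (gs, c)) = gs ++ [c] ++ pvChunk2 t := by
  induction t using pvChunk2.induct generalizing gs c with
  | case1 =>
      have hne : c ≠ [] := by intro h; simp [h] at hc
      simp [pvFlushA, List.foldl, pvChunk2, hne]
  | case2 a =>
      simp [pvFlushA, List.foldl, createParallelGroupsStepA, hc, pvChunk2]
  | case3 a b t ih =>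
      have h1 : createParallelGroupsStepA (gs, c) a = (gs ++ [c], [a]) := by
        simp [createParallelGroupsStepA, hc]
      have h2 : createParallelGroupsStepA (gs ++ [c], [a]) b = (gs ++ [c], [a, b]) := by
        simp [createParallelGroupsStepA]
      simp only [List.foldl, h1, h2]
      rw [ih (gs ++ [c]) [a, b] rfl]
      simp [pvChunk2]

theorem pvA_eq_chunk2 (xs : List String) (h : 2 < xs.length) :
    create_parallel_groups_py xs = pvChunk2 xs := by
  match xs with
  | a :: b :: t =>
    have ht : t ≠ [] := by
      intro h'; subst h'; simp at h
    unfold create_parallel_groups_py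
    simp only [if_neg (by omega : ¬ (a :: b :: t).length ≤ 2)]
    have h1 : createParallelGroupsStepA ([], []) a = ([], [a]) := by
      simp [createParallelGroupsStepA]
    have h2 : createParallelGroupsStepA ([], [a]) b = ([], [a, b]) := by
      simp [createParallelGroupsStepA]
    have := pvLoopA t [] [a, b] rfl
    simp only [List.foldl, h1, h2]
    simpa [pvFlushA, pvChunk2] using this

theorem pvPyRange_two_nil (a b : Int) (h : b ≤ a) :
    PySem.List.pyRange a b 2 = [] := by
  rw [PySem.List.pyRange_of_pos a b (by norm_num), if_neg (not_lt.mpr h)]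
  simp

theorem pvPyRange_two_cons (a b : Int) (h : a < b) :
    PySem.List.pyRange a b 2 = a :: PySem.List.pyRange (a + 2) b 2 := by
  rw [PySem.List.pyRange_of_pos a b (by norm_num),
      PySem.List.pyRange_of_pos (a + 2) b (by norm_num), if_pos h]
  by_cases h2 : a + 2 < b
  · rw [if_pos h2]
    have hc : ((b - a + 2 - 1) / 2).toNat = ((b - (a + 2) + 2 - 1) / 2).toNat + 1 := by
      omega
    rw [hc, List.range_succ_eq_map, List.map_cons, List.map_map]
    congr 1
    · simp
    · apply List.map_congr_left
      intro k _
      simp [Function.comp]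
      ring
  · rw [if_neg h2]
    have hc : ((b - a + 2 - 1) / 2).toNat = 1 := by omega
    simp [hc, List.range_one]

theorem pvB_map (xs t : List String) (k : Nat) (hk : xs.drop k = t) :
    (PySem.List.pyRange (k : Int) (xs.length : Int) 2).map
      (fun i => PySem.List.slice xs (some i) (some (i + 2))) = pvChunk2 t := by
  induction t using pvChunk2.induct generalizing k with
  | case1 =>
      have hlen : xs.length ≤ k := by
        have := congrArg List.length hk
        simp at this; omega
      rw [pvPyRange_two_nil _ _ (by exact_mod_cast hlen)]
      simp [pvChunk2]
  | case2 a =>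
      have hlen : xs.length = k + 1 := by
        have := congrArg List.length hk
        simp at this; omega
      rw [pvPyRange_two_cons _ _ (by exact_mod_cast (by omega : k < xs.length))]
      have hcast : ((k : Int) + 2) = ((k + 2 : Nat) : Int) := by push_cast; ring
      have hnil : PySem.List.pyRange ((k : Int) + 2) (xs.length : Int) 2 = [] := by
        rw [hcast]
        exact pvPyRange_two_nil _ _ (by exact_mod_cast (by omega : xs.length ≤ k + 2))
      rw [List.map_cons, hnil]
      rw [hcast, PySem.List.slice_natCast]
      simp [hk, pvChunk2]
  | case3 a b t' ih =>
      have hlt : k < xs.length := by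
        have := congrArg List.length hk
        simp at this; omega
      rw [pvPyRange_two_cons _ _ (by exact_mod_cast hlt)]
      have hcast : ((k : Int) + 2) = ((k + 2 : Nat) : Int) := by push_cast; ring
      have hdrop : xs.drop (k + 2) = t' := by
        have h2 := congrArg (List.drop 2) hk
        simp only [List.drop_drop] at h2
        simpa using h2
      rw [List.map_cons, hcast, PySem.List.slice_natCast, hk, ih (k + 2) hdrop]
      simp [pvChunk2]

theorem pvB_eq_ite (xs : List String) :
    create_parallel_groups_py_alt xs =
      if pvChunk2 xs = [] then [xs] else pvChunk2 xs := by
  have h := pvB_map xs xs 0 (by simp)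
  unfold create_parallel_groups_py_alt
  simp only [Nat.cast_zero] at h
  rw [h]

-- ===== VERDICT (by name: the statement is the Claim_ definition above) =====
theorem create_parallel_groups_py_spec : Claim_equal_create_parallel_groups_py := by
  intro xs _
  unfold Spec_create_parallel_groups_py
  rw [pvB_eq_ite]
  by_cases h : xs.length ≤ 2
  · have hA : create_parallel_groups_py xs = [xs] := by
      unfold create_parallel_groups_py; simp [h]
    rw [hA]
    match xs, h with
    | [], _ => simp [pvChunk2]
    | [a], _ => simp [pvChunk2]
    | [a, b], _ => simp [pvChunk2]
  · have hne : pvChunk2 xs ≠ [] := by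
      match xs, h with
      | [a], hx => exact absurd (by simp) hx
      | a :: b :: t, _ => simp [pvChunk2]
    rw [pvA_eq_chunk2 xs (by omega), if_neg hne]
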